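-- pv_equiv track=rewrite | github.com/markbroich/coding_challenges_example_solutions | coding_challenges_example_solutions/sum_pairs/sum_pairs.py | fillDict
-- ===== SOURCE A (Python) =====
-- def fillDict(arr):
--     myDict = {}
--     for i in range(0,len(arr)):
--         for j in range(i+1,len(arr)):
--             res = arr[i] + arr[j] # i**3 + j**3
--             if (res in myDict):
--                 myDict[res] = [myDict[res][0], myDict[res][1], i, j]
--             else:
--                 myDict[res] = [i, j]
--     return myDict
-- ===== SOURCE B (Python) =====
-- def fillDict(arr):
--     # collect-all-then-reduce: group every (i, j) pair by its sum, then reduce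
--     n = len(arr)
--     groups = {}
--     for i in range(0, n):
--         for j in range(i + 1, n):
--             s = arr[i] + arr[j]
--             groups[s] = groups.get(s, []) + [(i, j)]
--     out = {}
--     for s, pairs in groups.items():
--         out[s] = ([pairs[0][0], pairs[0][1]] if len(pairs) == 1
--                   else [pairs[0][0], pairs[0][1], pairs[-1][0], pairs[-1][1]])
--     return out
-- ===== Notes on version B (the rewrite author's own statement) =====
-- stated objective: alternative
-- what changed: A maintains each sum's first/last index pair inline while looping; B first groups ALL (i,j) pairs by their sum into a dict of lists and then, in a separate pass over the groups, reduces each list to [i,j] or [first_i,first_j,last_i,last_j].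
import Mathlib
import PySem

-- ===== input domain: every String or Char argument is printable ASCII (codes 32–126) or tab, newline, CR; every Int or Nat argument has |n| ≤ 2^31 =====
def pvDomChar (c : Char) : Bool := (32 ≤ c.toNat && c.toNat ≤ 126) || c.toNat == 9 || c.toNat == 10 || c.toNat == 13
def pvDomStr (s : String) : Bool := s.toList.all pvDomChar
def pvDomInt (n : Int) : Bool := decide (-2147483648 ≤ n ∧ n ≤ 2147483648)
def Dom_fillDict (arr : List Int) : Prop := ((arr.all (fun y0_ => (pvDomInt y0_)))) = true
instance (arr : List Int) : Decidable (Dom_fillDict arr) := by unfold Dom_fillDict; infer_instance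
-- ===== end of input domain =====

-- B groups all (i,j) pairs by sum first, then reduces each group in a second pass;
-- A instead maintains first/last pairs inline.  Same return value; no side effects.

-- ===== PORT A =====
def fillDict (arr : List Int) : List (Int × List Int) :=
  let n : Int := (arr.length : Int)
  ((PySem.List.pyRange 0 n 1).foldl (fun d i =>
    (PySem.List.pyRange (i + 1) n 1).foldl (fun d j =>
      let res := PySem.List.pyGetD arr i 0 + PySem.List.pyGetD arr j 0
      if d.contains res then
        let cur := d.getD res []
        d.insert res [PySem.List.pyGetD cur 0 0, PySem.List.pyGetD cur 1 0, i, j]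
      else
        d.insert res [i, j]) d)
    (PySem.Dict.empty : PySem.Dict Int (List Int))).items

-- ===== PORT B =====
def fillDict_alt (arr : List Int) : List (Int × List Int) :=
  let n : Int := (arr.length : Int)
  let groups := (PySem.List.pyRange 0 n 1).foldl (fun g i =>
    (PySem.List.pyRange (i + 1) n 1).foldl (fun g j =>
      let s := PySem.List.pyGetD arr i 0 + PySem.List.pyGetD arr j 0
      g.insert s (g.getD s [] ++ [(i, j)])) g)
    (PySem.Dict.empty : PySem.Dict Int (List (Int × Int)))
  (groups.items.foldl (fun o p =>
    o.insert p.1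
      (if p.2.length = 1 then
        [(PySem.List.pyGetD p.2 0 (0, 0)).1, (PySem.List.pyGetD p.2 0 (0, 0)).2]
      else
        [(PySem.List.pyGetD p.2 0 (0, 0)).1, (PySem.List.pyGetD p.2 0 (0, 0)).2,
         (PySem.List.pyGetD p.2 (-1) (0, 0)).1, (PySem.List.pyGetD p.2 (-1) (0, 0)).2]))
    (PySem.Dict.empty : PySem.Dict Int (List Int))).items

-- ===== PRECONDITION & SPEC =====
def Spec_fillDict (arr : List Int) (out : List (Int × List Int)) : Prop := out = fillDict_alt arr
instance (arr : List Int) (out : List (Int × List Int)) : Decidable (Spec_fillDict arr out) := by unfold Spec_fillDict; infer_instance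

-- ===== CLAIM (what is proved, stated in full; the proofs are below) =====
def Claim_equal_fillDict : Prop := ∀ (arr : List Int), Dom_fillDict arr → Spec_fillDict arr (fillDict arr)

-- ===== LEMMAS AND PROOFS =====

-- B's reduction of one group (exactly the value inserted by B's second pass)
def pvRed (l : List (Int × Int)) : List Int :=
  if l.length = 1 then
    [(PySem.List.pyGetD l 0 (0, 0)).1, (PySem.List.pyGetD l 0 (0, 0)).2]
  else
    [(PySem.List.pyGetD l 0 (0, 0)).1, (PySem.List.pyGetD l 0 (0, 0)).2,
     (PySem.List.pyGetD l (-1) (0, 0)).1, (PySem.List.pyGetD l (-1) (0, 0)).2]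

-- invariant: A's dict is B's group dict reduced entrywise; groups nonempty; keys unique
def pvInv (d : PySem.Dict Int (List Int)) (g : PySem.Dict Int (List (Int × Int))) : Prop :=
  d.items = g.items.map (fun p => (p.1, pvRed p.2)) ∧
  (∀ p ∈ g.items, p.2 ≠ []) ∧ g.keys.Nodup


lemma pvRed_singleton (i j : Int) : pvRed [(i, j)] = [i, j] := by
  simp [pvRed, PySem.List.pyGetD]

lemma pvRed_append (l : List (Int × Int)) (hl : l ≠ []) (i j : Int) :
    pvRed (l ++ [(i, j)]) =
      [PySem.List.pyGetD (pvRed l) 0 0, PySem.List.pyGetD (pvRed l) 1 0, i, j] := by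
  match l with
  | [] => exact absurd rfl hl
  | (a, b) :: rest =>
    have hlen : (((a, b) :: rest) ++ [(i, j)]).length ≠ 1 := by simp
    have e1 : PySem.List.pyGetD (((a, b) :: rest) ++ [(i, j)]) (-1) (0, 0) = (i, j) :=
      PySem.List.pyGetD_neg_one_append_singleton _ _ _
    have e0 : PySem.List.pyGetD (((a, b) :: rest) ++ [(i, j)]) 0 (0, 0) = (a, b) := by
      rw [List.cons_append]; exact PySem.List.pyGetD_zero_cons _ _ _
    simp only [pvRed]
    rw [if_neg hlen, e0, e1]
    cases rest with
    | nil => simp [PySem.List.pyGetD]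
    | cons c cs =>
      have hlen2 : ((a, b) :: c :: cs).length ≠ 1 := by simp
      rw [if_neg hlen2]
      simp [PySem.List.pyGetD]

lemma pvInv_step (r i j : Int) (d : PySem.Dict Int (List Int))
    (g : PySem.Dict Int (List (Int × Int))) (h : pvInv d g) :
    pvInv
      (if d.contains r then
        d.insert r [PySem.List.pyGetD (d.getD r []) 0 0, PySem.List.pyGetD (d.getD r []) 1 0, i, j]
      else d.insert r [i, j])
      (g.insert r (g.getD r [] ++ [(i, j)])) := by
  obtain ⟨hmap, hne, hnd⟩ := h
  have hkeys : d.keys = g.keys := by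
    simp only [PySem.Dict.keys, hmap, List.map_map]
    rfl
  have hdnd : d.keys.Nodup := hkeys ▸ hnd
  have hcont : d.contains r = g.contains r := by
    rw [PySem.Dict.contains_eq_decide_mem_keys, PySem.Dict.contains_eq_decide_mem_keys, hkeys]
  by_cases hc : g.contains r = true
  · rw [hcont, hc, if_pos rfl]
    refine ⟨?_, ?_, ?_⟩
    · rw [PySem.Dict.items_insert_of_contains _ _ hc,
        PySem.Dict.items_insert_of_contains _ _ (hcont.trans hc), hmap, List.map_map,
        List.map_map]
      apply List.map_congr_left
      intro p hp
      by_cases hpr : p.1 = r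
      · have hmem : (r, pvRed p.2) ∈ d.items := by
          rw [hmap]
          exact List.mem_map.mpr ⟨p, hp, by rw [hpr]⟩
        have hget : d.getD r [] = pvRed p.2 := PySem.Dict.getD_of_mem_items d hmem hdnd []
        have hgget : g.getD r [] = p.2 := by
          rw [← hpr]; exact PySem.Dict.getD_of_mem_items g hp hnd []
        simp only [Function.comp_apply, hpr, beq_self_eq_true, if_true, hget, hgget,
          pvRed_append p.2 (hne p hp) i j]
      · simp [Function.comp, hpr]
    · intro p hp
      rcases (PySem.Dict.mem_items_insert g r _ p).mp hp with hp1 | ⟨hp2, _⟩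
      · subst hp1; simp
      · exact hne p hp2
    · rw [PySem.Dict.keys_insert_of_contains _ _ hc]
      exact hnd
  · have hc' : g.contains r = false := by
      cases hcg : g.contains r
      · rfl
      · exact absurd hcg hc
    rw [hcont, hc', if_neg (by simp)]
    refine ⟨?_, ?_, ?_⟩
    · rw [PySem.Dict.items_insert_of_not_contains _ _ (hcont.trans hc'),
        PySem.Dict.items_insert_of_not_contains _ _ hc', List.map_append, hmap,
        PySem.Dict.getD_of_not_contains g _ hc']
      simp [pvRed_singleton]
    · intro p hp
      rcases (PySem.Dict.mem_items_insert g r _ p).mp hp with hp1 | ⟨hp2, _⟩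
      · subst hp1; simp
      · exact hne p hp2
    · rw [PySem.Dict.keys_insert_of_not_contains _ _ hc']
      have hrmem : r ∉ g.keys := fun hmem =>
        hc ((PySem.Dict.contains_iff_mem_keys g r).mpr hmem)
      refine List.Nodup.append hnd (List.nodup_singleton r) ?_
      intro a ha hb
      simp only [List.mem_singleton] at hb
      subst hb
      exact hrmem ha

lemma pvInv_foldl {α : Type} (l : List α)
    (fA : PySem.Dict Int (List Int) → α → PySem.Dict Int (List Int))
    (fB : PySem.Dict Int (List (Int × Int)) → α → PySem.Dict Int (List (Int × Int)))
    (hstep : ∀ x d g, pvInv d g → pvInv (fA d x) (fB g x))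
    (d : PySem.Dict Int (List Int)) (g : PySem.Dict Int (List (Int × Int)))
    (h : pvInv d g) : pvInv (l.foldl fA d) (l.foldl fB g) := by
  induction l generalizing d g with
  | nil => exact h
  | cons x xs ih => exact ih _ _ (hstep x d g h)

-- ===== VERDICT (by name: the statement is the Claim_ definition above) =====
theorem fillDict_spec : Claim_equal_fillDict := by
  intro arr _
  have hinv : pvInv
      ((PySem.List.pyRange 0 (arr.length : Int) 1).foldl (fun d i =>
        (PySem.List.pyRange (i + 1) (arr.length : Int) 1).foldl (fun d j =>
          let res := PySem.List.pyGetD arr i 0 + PySem.List.pyGetD arr j 0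
          if d.contains res then
            let cur := d.getD res []
            d.insert res [PySem.List.pyGetD cur 0 0, PySem.List.pyGetD cur 1 0, i, j]
          else
            d.insert res [i, j]) d)
        (PySem.Dict.empty : PySem.Dict Int (List Int)))
      ((PySem.List.pyRange 0 (arr.length : Int) 1).foldl (fun g i =>
        (PySem.List.pyRange (i + 1) (arr.length : Int) 1).foldl (fun g j =>
          let s := PySem.List.pyGetD arr i 0 + PySem.List.pyGetD arr j 0
          g.insert s (g.getD s [] ++ [(i, j)])) g)
        (PySem.Dict.empty : PySem.Dict Int (List (Int × Int)))) := by
    apply pvInv_foldl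
    · intro i d g h
      apply pvInv_foldl
      · intro j d g h
        exact pvInv_step (PySem.List.pyGetD arr i 0 + PySem.List.pyGetD arr j 0) i j d g h
      · exact h
    · exact ⟨rfl, by intro p hp; simp [PySem.Dict.empty] at hp,
        PySem.Dict.nodup_keys_empty⟩
  obtain ⟨hmap, hne, hnd⟩ := hinv
  have h2 := PySem.Dict.items_foldl_insert_fresh
    (ν := List Int)
    ((PySem.List.pyRange 0 (arr.length : Int) 1).foldl (fun g i =>
        (PySem.List.pyRange (i + 1) (arr.length : Int) 1).foldl (fun g j =>
          let s := PySem.List.pyGetD arr i 0 + PySem.List.pyGetD arr j 0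
          g.insert s (g.getD s [] ++ [(i, j)])) g)
        (PySem.Dict.empty : PySem.Dict Int (List (Int × Int)))).items
    Prod.fst (fun p => pvRed p.2) PySem.Dict.empty
    (fun a _ => PySem.Dict.contains_empty a.1)
    (by simpa only [PySem.Dict.keys] using hnd)
  simp only [show (PySem.Dict.empty : PySem.Dict Int (List Int)).items = [] from rfl, List.nil_append] at h2
  show ((PySem.List.pyRange 0 (arr.length : Int) 1).foldl (fun d i =>
        (PySem.List.pyRange (i + 1) (arr.length : Int) 1).foldl (fun d j =>
          let res := PySem.List.pyGetD arr i 0 + PySem.List.pyGetD arr j 0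
          if d.contains res then
            let cur := d.getD res []
            d.insert res [PySem.List.pyGetD cur 0 0, PySem.List.pyGetD cur 1 0, i, j]
          else
            d.insert res [i, j]) d)
        (PySem.Dict.empty : PySem.Dict Int (List Int))).items =
    (((PySem.List.pyRange 0 (arr.length : Int) 1).foldl (fun g i =>
        (PySem.List.pyRange (i + 1) (arr.length : Int) 1).foldl (fun g j =>
          let s := PySem.List.pyGetD arr i 0 + PySem.List.pyGetD arr j 0
          g.insert s (g.getD s [] ++ [(i, j)])) g)
        (PySem.Dict.empty : PySem.Dict Int (List (Int × Int)))).items.foldl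
      (fun o p => o.insert p.1 (pvRed p.2)) (PySem.Dict.empty : PySem.Dict Int (List Int))).items
  rw [hmap]
  exact h2.symm
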